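-- pv_equiv track=rewrite | github.com/ebehlmann/puzzling | python/advent_of_code/2015/day_3/day_3.py | track_visits
-- ===== SOURCE A (Python) =====
-- def follow_instruction(current_location, direction):
-- 	if direction == '>':
-- 		new_location = (current_location[0] + 1, current_location[1])
-- 	elif direction == '<':
-- 		new_location = (current_location[0] - 1, current_location[1])
-- 	elif direction == '^':
-- 		new_location = (current_location[0], current_location[1] + 1)
-- 	else:
-- 		new_location = (current_location[0], current_location[1] - 1)
-- 	return new_location
--
-- def add_visit(visits, location):
-- 	if location in visits:
-- 		visits[location] += 1
-- 	else:
-- 		visits[location] = 1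
-- 	return visits
--
-- def track_visits(instructions):
-- 	visits = {}
-- 	current_location = (0, 0)
-- 	visits[current_location] = 1
-- 	for instruction in instructions:
-- 		current_location = follow_instruction(current_location, instruction)
-- 		visits = add_visit(visits, current_location)
-- 	return visits
-- ===== SOURCE B (Python) =====
-- def track_visits(instructions):
-- 	def solve(s):
-- 		# returns (counts of positions visited while walking s, start excluded,
-- 		# relative to the start, keyed in first-visit order; net displacement)
-- 		if len(s) == 0:
-- 			return {}, (0, 0)
-- 		if len(s) == 1:
-- 			d = {'>': (1, 0), '<': (-1, 0), '^': (0, 1)}.get(s[0], (0, -1))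
-- 			return {d: 1}, d
-- 		mid = len(s) // 2
-- 		dl, tl = solve(s[:mid])
-- 		dr, tr = solve(s[mid:])
-- 		for (kx, ky), v in dr.items():
-- 			k = (tl[0] + kx, tl[1] + ky)
-- 			dl[k] = dl.get(k, 0) + v
-- 		return dl, (tl[0] + tr[0], tl[1] + tr[1])
-- 	counts, _ = solve(instructions)
-- 	visits = {(0, 0): 1}
-- 	for k, v in counts.items():
-- 		visits[k] = visits.get(k, 0) + v
-- 	return visits
-- ===== Notes on version B (the rewrite author's own statement) =====
-- stated objective: alternative
-- what changed: Replaces A's linear step-and-count walk by a divide-and-conquer: each half of the instruction string is solved recursively into (relative visit-count dict, net displacement), and the right half's dict is merged into the left's after shifting its keys by the left's net displacement; no position is ever stepped through globally.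
import Mathlib
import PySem

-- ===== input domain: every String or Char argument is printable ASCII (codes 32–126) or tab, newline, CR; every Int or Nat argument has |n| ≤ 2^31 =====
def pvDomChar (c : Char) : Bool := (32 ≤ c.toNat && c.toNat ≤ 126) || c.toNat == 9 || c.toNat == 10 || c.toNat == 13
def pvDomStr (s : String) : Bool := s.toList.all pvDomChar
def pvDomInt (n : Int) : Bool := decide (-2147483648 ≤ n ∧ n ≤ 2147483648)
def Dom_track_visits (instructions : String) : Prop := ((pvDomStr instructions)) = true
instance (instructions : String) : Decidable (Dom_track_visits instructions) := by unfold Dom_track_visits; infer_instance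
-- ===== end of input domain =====

-- B replaces A's single step-and-count walk by a divide-and-conquer recursion that merges
-- the two halves' relative visit-count dicts (right keys shifted by the left's net
-- displacement); objective: alternative (not faster).


-- ===== PORT A =====
def followInstruction (current_location : Int × Int) (direction : Char) : Int × Int :=
  if direction = '>' then (current_location.1 + 1, current_location.2)
  else if direction = '<' then (current_location.1 - 1, current_location.2)
  else if direction = '^' then (current_location.1, current_location.2 + 1)
  else (current_location.1, current_location.2 - 1)

def addVisit (visits : PySem.Dict (Int × Int) Int) (location : Int × Int) : PySem.Dict (Int × Int) Int :=
  if visits.contains location then visits.modify location 0 (· + 1)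
  else visits.insert location 1

def track_visits (instructions : String) : List (Int × Int × Int) :=
  let init : PySem.Dict (Int × Int) Int := (PySem.Dict.empty).insert (0, 0) 1
  let st := instructions.toList.foldl
    (fun (s : PySem.Dict (Int × Int) Int × (Int × Int)) instruction =>
      let loc := followInstruction s.2 instruction
      (addVisit s.1 loc, loc)) (init, (0, 0))
  st.1.items.map (fun p => (p.1.1, p.1.2, p.2))

-- ===== PORT B =====
-- the literal dict {'>': (1,0), '<': (-1,0), '^': (0,1)} of Source B
def pvDeltasB : PySem.Dict Char (Int × Int) :=
  (((PySem.Dict.empty).insert '>' (1, 0)).insert '<' (-1, 0)).insert '^' (0, 1)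

-- inner recursion 'solve' of Source B: (relative visit counts excluding the start, net displacement);
-- the slices s[:mid]/s[mid:] (nonnegative bounds) are List.take/List.drop
def solveB (s : List Char) : PySem.Dict (Int × Int) Int × (Int × Int) :=
  match s with
  | [] => (PySem.Dict.empty, (0, 0))
  | [c] =>
    let d := pvDeltasB.getD c (0, -1)
    ((PySem.Dict.empty).insert d 1, d)
  | c1 :: c2 :: rest =>
    let mid := (c1 :: c2 :: rest).length / 2
    let l := solveB ((c1 :: c2 :: rest).take mid)
    let r := solveB ((c1 :: c2 :: rest).drop mid)
    (r.1.items.foldl (fun d kv =>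
        d.insert (l.2.1 + kv.1.1, l.2.2 + kv.1.2)
          (d.getD (l.2.1 + kv.1.1, l.2.2 + kv.1.2) 0 + kv.2)) l.1,
     (l.2.1 + r.2.1, l.2.2 + r.2.2))
termination_by s.length
decreasing_by
  · simp [List.length_take]; omega
  · simp [List.length_drop]; omega

def track_visits_alt (instructions : String) : List (Int × Int × Int) :=
  let counts := (solveB instructions.toList).1
  let visits := counts.items.foldl
    (fun (d : PySem.Dict (Int × Int) Int) kv => d.insert kv.1 (d.getD kv.1 0 + kv.2))
    ((PySem.Dict.empty).insert (0, 0) 1)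
  visits.items.map (fun p => (p.1.1, p.1.2, p.2))

-- ===== PRECONDITION & SPEC =====
def Spec_track_visits (instructions : String) (out : List (Int × Int × Int)) : Prop := out = track_visits_alt instructions
instance (instructions : String) (out : List (Int × Int × Int)) : Decidable (Spec_track_visits instructions out) := by unfold Spec_track_visits; infer_instance

-- ===== CLAIM (what is proved, stated in full; the proofs are below) =====
def Claim_equal_track_visits : Prop := ∀ (instructions : String), Dom_track_visits instructions → Spec_track_visits instructions (track_visits instructions)

-- ===== LEMMAS AND PROOFS =====

-- the sequence of positions visited when walking cs from loc (start excluded)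
def pvWalk (loc : Int × Int) : List Char → List (Int × Int)
  | [] => []
  | c :: cs => let l := followInstruction loc c; l :: pvWalk l cs

-- the two loop bodies, named
def pvStep (d : PySem.Dict (Int × Int) Int) (p : Int × Int) : PySem.Dict (Int × Int) Int :=
  d.insert p (d.getD p 0 + 1)
def pvMStep (d : PySem.Dict (Int × Int) Int) (kv : (Int × Int) × Int) : PySem.Dict (Int × Int) Int :=
  d.insert kv.1 (d.getD kv.1 0 + kv.2)
def pvW (l : List (Int × Int)) : PySem.Dict (Int × Int) Int := l.foldl pvStep PySem.Dict.empty

-- A's add_visit is one counting insert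
theorem addVisit_eq (d : PySem.Dict (Int × Int) Int) (k : Int × Int) :
    addVisit d k = d.insert k (d.getD k 0 + 1) := by
  unfold addVisit
  by_cases h : d.contains k = true
  · simp [h]; rfl
  · rw [if_neg h, PySem.Dict.getD_of_not_contains d 0 (by simpa using h)]
    norm_num

-- Source B's delta table realises follow_instruction
theorem delta_eq (c : Char) : pvDeltasB.getD c (0, -1) = followInstruction (0, 0) c := by
  unfold pvDeltasB followInstruction
  simp only [PySem.Dict.getD_insert, PySem.Dict.getD_empty]
  split_ifs with h1 h2 h3 h4 h5 h6 <;> simp_all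

-- A's interleaved fold: the dict component counts the walk
theorem foldA (cs : List Char) : ∀ (d : PySem.Dict (Int × Int) Int) (loc : Int × Int),
    cs.foldl (fun (s : PySem.Dict (Int × Int) Int × (Int × Int)) c =>
        let l := followInstruction s.2 c; (addVisit s.1 l, l)) (d, loc)
      = ((pvWalk loc cs).foldl pvStep d, (pvWalk loc cs).getLastD loc) := by
  induction cs with
  | nil => intro d loc; simp [pvWalk]
  | cons c cs ih =>
    intro d loc
    rw [List.foldl_cons]
    show List.foldl (fun (s : PySem.Dict (Int × Int) Int × (Int × Int)) c =>
        let l := followInstruction s.2 c; (addVisit s.1 l, l))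
        (addVisit d (followInstruction loc c), followInstruction loc c) cs = _
    rw [ih]
    simp only [pvWalk, List.foldl_cons, addVisit_eq]
    show _ = ((pvWalk (followInstruction loc c) cs).foldl pvStep
        (pvStep d (followInstruction loc c)), _)
    cases hw : pvWalk (followInstruction loc c) cs with
    | nil => simp [pvStep]
    | cons p ps =>
      cases h2 : (p :: ps).getLast? with
      | none => simp [List.getLast?_eq_none_iff] at h2
      | some q => simp [h2, pvStep]

-- walking from a shifted start shifts every visited position
theorem follow_shift (a loc : Int × Int) (c : Char) :
    followInstruction (a.1 + loc.1, a.2 + loc.2) c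
      = (a.1 + (followInstruction loc c).1, a.2 + (followInstruction loc c).2) := by
  unfold followInstruction
  split_ifs <;> simp <;> ring

theorem walk_shift (cs : List Char) : ∀ (a loc : Int × Int),
    pvWalk (a.1 + loc.1, a.2 + loc.2) cs
      = (pvWalk loc cs).map (fun p => (a.1 + p.1, a.2 + p.2)) := by
  induction cs with
  | nil => intro a loc; simp [pvWalk]
  | cons c cs ih =>
    intro a loc
    simp only [pvWalk, List.map_cons, follow_shift, List.cons.injEq]
    exact ⟨trivial, ih a (followInstruction loc c)⟩

theorem walk_shift0 (cs : List Char) (a : Int × Int) :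
    pvWalk a cs = (pvWalk (0, 0) cs).map (fun p => (a.1 + p.1, a.2 + p.2)) := by
  have h := walk_shift cs a (0, 0)
  simpa using h

theorem walk_append (s t : List Char) : ∀ (loc : Int × Int),
    pvWalk loc (s ++ t) = pvWalk loc s ++ pvWalk ((pvWalk loc s).getLastD loc) t := by
  induction s with
  | nil => intro loc; simp [pvWalk]
  | cons c s ih =>
    intro loc
    simp only [List.cons_append, pvWalk, List.cons.injEq, true_and]
    rw [ih (followInstruction loc c)]
    cases hw : pvWalk (followInstruction loc c) s with
    | nil => simp
    | cons p ps =>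
      cases h2 : (p :: ps).getLast? with
      | none => simp [List.getLast?_eq_none_iff] at h2
      | some q => simp [h2]

theorem walk_length (cs : List Char) : ∀ loc, (pvWalk loc cs).length = cs.length := by
  induction cs with
  | nil => intro loc; simp [pvWalk]
  | cons c cs ih => intro loc; simp [pvWalk, ih]

-- a fold of pvMStep leaves an untouched key's value alone
theorem getD_fold_of_not_mem (its : List ((Int × Int) × Int)) :
    ∀ (d : PySem.Dict (Int × Int) Int) (k : Int × Int), k ∉ its.map (·.1) →
    (its.foldl pvMStep d).getD k 0 = d.getD k 0 := by
  induction its with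
  | nil => intro d k h; rfl
  | cons kv its ih =>
    intro d k h
    simp only [List.map_cons, List.mem_cons, not_or] at h
    rw [List.foldl_cons, ih _ _ h.2]
    exact PySem.Dict.getD_insert_of_ne _ _ _ h.1

-- two inserts at distinct keys commute when the first key is already present
theorem insert_comm_of_contains (d : PySem.Dict (Int × Int) Int) (k a : Int × Int)
    (y u : Int) (hk : d.contains k = true) (hne : a ≠ k) :
    (d.insert k y).insert a u = (d.insert a u).insert k y := by
  apply PySem.Dict.ext
  have hka : (d.insert k y).contains a = d.contains a := by
    rw [PySem.Dict.contains_insert]; simp [hne]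
  have hak : (d.insert a u).contains k = true := by
    rw [PySem.Dict.contains_insert]; simp [hk]
  by_cases ha : d.contains a = true
  · rw [PySem.Dict.items_insert_of_contains _ _ (hka.trans ha),
        PySem.Dict.items_insert_of_contains _ _ hk,
        PySem.Dict.items_insert_of_contains _ _ hak,
        PySem.Dict.items_insert_of_contains _ _ ha, List.map_map, List.map_map]
    apply List.map_congr_left
    intro p _
    by_cases h1 : p.1 = k <;> by_cases h2 : p.1 = a <;>
      simp_all [Function.comp, Ne.symm hne]
  · have ha' : d.contains a = false := by simpa using ha
    rw [PySem.Dict.items_insert_of_not_contains _ _ (hka.trans ha'),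
        PySem.Dict.items_insert_of_contains _ _ hk,
        PySem.Dict.items_insert_of_contains _ _ hak,
        PySem.Dict.items_insert_of_not_contains _ _ ha', List.map_append]
    simp [hne]

-- a final overwrite at a present key commutes past a fold over other keys
theorem comm_fold (its : List ((Int × Int) × Int)) :
    ∀ (D : PySem.Dict (Int × Int) Int) (k : Int × Int) (y : Int),
    D.contains k = true → k ∉ its.map (·.1) →
    its.foldl pvMStep (D.insert k y) = (its.foldl pvMStep D).insert k y := by
  induction its with
  | nil => intro D k y _ _; rfl
  | cons kv its ih =>
    intro D k y hk hmem
    simp only [List.map_cons, List.mem_cons, not_or] at hmem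
    obtain ⟨h1, h2⟩ := hmem
    rw [List.foldl_cons, List.foldl_cons]
    have hstep : pvMStep (D.insert k y) kv = (pvMStep D kv).insert k y := by
      unfold pvMStep
      rw [PySem.Dict.getD_insert_of_ne _ _ _ (Ne.symm h1)]
      exact insert_comm_of_contains D k kv.1 y _ hk (Ne.symm h1)
    rw [hstep]
    exact ih _ _ _ (by unfold pvMStep; rw [PySem.Dict.contains_insert]; simp [hk]) h2

theorem map_bump_of_not_mem (its : List ((Int × Int) × Int)) (x : Int × Int) (v' : Int)
    (h : x ∉ its.map (·.1)) :
    its.map (fun p => if p.1 == x then (x, v') else p) = its := by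
  rw [List.map_congr_left (g := id), List.map_id]
  intro p hp
  have : p.1 ≠ x := fun he => h (he ▸ List.mem_map_of_mem hp)
  simp [this]

-- bumping one entry's value by 1 before the merge fold = merging then one extra counting insert
theorem bump (its : List ((Int × Int) × Int)) (x : Int × Int) (v : Int)
    (hnd : (its.map (·.1)).Nodup) (hmem : (x, v) ∈ its)
    (d : PySem.Dict (Int × Int) Int) :
    (its.map (fun p => if p.1 == x then (x, v + 1) else p)).foldl pvMStep d
      = (its.foldl pvMStep d).insert x ((its.foldl pvMStep d).getD x 0 + 1) := by
  obtain ⟨pre, post, rfl⟩ := List.append_of_mem hmem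
  have hx : x ∉ pre.map (·.1) ∧ x ∉ post.map (·.1) := by
    rw [List.map_append, List.map_cons] at hnd
    obtain ⟨hn1, hn2, hdisj⟩ := List.nodup_append.mp hnd
    exact ⟨fun hm => hdisj x hm x List.mem_cons_self rfl, (List.nodup_cons.mp hn2).1⟩
  rw [List.map_append, List.map_cons, map_bump_of_not_mem pre x _ hx.1,
      map_bump_of_not_mem post x _ hx.2]
  simp only [BEq.rfl, if_true, List.foldl_append, List.foldl_cons]
  set d0 := pre.foldl pvMStep d with hd0
  set g := d0.getD x 0 with hg
  have hL : pvMStep d0 (x, v + 1) = (pvMStep d0 (x, v)).insert x (g + (v + 1)) := by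
    unfold pvMStep
    exact (PySem.Dict.insert_insert_self _ _ _ _).symm
  rw [hL, comm_fold post _ x _ (by unfold pvMStep; exact PySem.Dict.contains_insert_self _ _ _) hx.2]
  have hG : (post.foldl pvMStep (pvMStep d0 (x, v))).getD x 0 = g + v := by
    rw [getD_fold_of_not_mem post _ x hx.2]
    unfold pvMStep
    exact PySem.Dict.getD_insert_self _ _ _ _
  rw [hG, add_assoc]

-- CORE: merging a counting dict into d entry by entry = counting its underlying list into d
theorem core (u : List (Int × Int)) : ∀ (d : PySem.Dict (Int × Int) Int),
    (pvW u).items.foldl pvMStep d = u.foldl pvStep d := by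
  induction u using List.reverseRecOn with
  | nil => intro d; rfl
  | append_singleton u x ih =>
    intro d
    have hW : pvW (u ++ [x]) = pvStep (pvW u) x := by
      unfold pvW; rw [List.foldl_append]; rfl
    have hnd : (pvW u).keys.Nodup :=
      PySem.Dict.nodup_keys_foldl_insert u (fun d x => d.getD x 0 + 1) _ PySem.Dict.nodup_keys_empty
    rw [hW, List.foldl_append, List.foldl_cons, List.foldl_nil, ← ih d]
    by_cases hc : (pvW u).contains x = true
    · obtain ⟨v, hv⟩ : ∃ v, (pvW u).get? x = some v := by
        have h := PySem.Dict.contains_eq_isSome_get? (pvW u) x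
        rw [hc] at h
        exact Option.isSome_iff_exists.mp h.symm
      have hg : (pvW u).getD x 0 = v := PySem.Dict.getD_of_get?_eq_some _ _ hv
      have hm : (x, v) ∈ (pvW u).items := PySem.Dict.mem_items_of_get?_eq_some _ hv
      show (pvStep (pvW u) x).items.foldl pvMStep d = pvStep ((pvW u).items.foldl pvMStep d) x
      unfold pvStep
      rw [PySem.Dict.items_insert_of_contains _ _ hc, hg]
      exact bump _ x v (by simpa [PySem.Dict.keys] using hnd) hm d
    · have hc' : (pvW u).contains x = false := by simpa using hc
      show (pvStep (pvW u) x).items.foldl pvMStep d = pvStep ((pvW u).items.foldl pvMStep d) x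
      unfold pvStep
      rw [PySem.Dict.items_insert_of_not_contains _ _ hc',
          PySem.Dict.getD_of_not_contains _ _ hc', List.foldl_append, List.foldl_cons,
          List.foldl_nil]
      unfold pvMStep
      norm_num

-- the counting dict of a shifted list has the shifted items, in the same order
theorem shift_items (w : List (Int × Int)) (t : Int × Int) :
    (pvW (w.map (fun p => (t.1 + p.1, t.2 + p.2)))).items
      = (pvW w).items.map (fun p => ((t.1 + p.1.1, t.2 + p.1.2), p.2)) := by
  induction w using List.reverseRecOn with
  | nil => rfl
  | append_singleton w x ih =>
    have hndw : (pvW w).keys.Nodup :=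
      PySem.Dict.nodup_keys_foldl_insert w (fun d x => d.getD x 0 + 1) _ PySem.Dict.nodup_keys_empty
    have hnds : (pvW (w.map (fun p => (t.1 + p.1, t.2 + p.2)))).keys.Nodup :=
      PySem.Dict.nodup_keys_foldl_insert _ (fun d x => d.getD x 0 + 1) _ PySem.Dict.nodup_keys_empty
    have hWs : pvW ((w ++ [x]).map (fun p => (t.1 + p.1, t.2 + p.2)))
        = pvStep (pvW (w.map (fun p => (t.1 + p.1, t.2 + p.2)))) (t.1 + x.1, t.2 + x.2) := by
      unfold pvW; rw [List.map_append, List.foldl_append]; rfl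
    have hWw : pvW (w ++ [x]) = pvStep (pvW w) x := by
      unfold pvW; rw [List.foldl_append]; rfl
    have hkeys : (pvW (w.map (fun p => (t.1 + p.1, t.2 + p.2)))).contains (t.1 + x.1, t.2 + x.2)
        = (pvW w).contains x := by
      rw [PySem.Dict.contains_eq_decide_mem_keys, PySem.Dict.contains_eq_decide_mem_keys]
      simp only [PySem.Dict.keys, ih, List.map_map]
      congr 1
      simp only [eq_iff_iff, List.mem_map, Function.comp]
      constructor
      · rintro ⟨p, hp, he⟩
        have : p.1 = x := by
          have h1 : t.1 + p.1.1 = t.1 + x.1 := congrArg Prod.fst he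
          have h2 : t.2 + p.1.2 = t.2 + x.2 := congrArg Prod.snd he
          exact Prod.ext (by omega) (by omega)
        exact ⟨p, hp, this⟩
      · rintro ⟨p, hp, he⟩
        exact ⟨p, hp, by rw [he]⟩
    rw [hWs, hWw]
    by_cases hc : (pvW w).contains x = true
    · obtain ⟨v, hv⟩ : ∃ v, (pvW w).get? x = some v := by
        have h := PySem.Dict.contains_eq_isSome_get? (pvW w) x
        rw [hc] at h
        exact Option.isSome_iff_exists.mp h.symm
      have hgw : (pvW w).getD x 0 = v := PySem.Dict.getD_of_get?_eq_some _ _ hv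
      have hmw : (x, v) ∈ (pvW w).items := PySem.Dict.mem_items_of_get?_eq_some _ hv
      have hms : ((t.1 + x.1, t.2 + x.2), v)
          ∈ (pvW (w.map (fun p => (t.1 + p.1, t.2 + p.2)))).items := by
        rw [ih]
        exact List.mem_map_of_mem hmw
      have hgs : (pvW (w.map (fun p => (t.1 + p.1, t.2 + p.2)))).getD (t.1 + x.1, t.2 + x.2) 0 = v :=
        PySem.Dict.getD_of_mem_items _ hms hnds 0
      unfold pvStep
      rw [PySem.Dict.items_insert_of_contains _ _ (hkeys.trans hc),
          PySem.Dict.items_insert_of_contains _ _ hc, hgs, hgw, ih, List.map_map, List.map_map]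
      apply List.map_congr_left
      intro p hp
      simp only [Function.comp]
      by_cases hpx : p.1 = x
      · simp [hpx]
      · have hne : ¬ ((t.1 + p.1.1, t.2 + p.1.2) = (t.1 + x.1, t.2 + x.2)) := by
          intro he
          have h1 : t.1 + p.1.1 = t.1 + x.1 := congrArg Prod.fst he
          have h2 : t.2 + p.1.2 = t.2 + x.2 := congrArg Prod.snd he
          exact hpx (Prod.ext (by omega) (by omega))
        simp [hpx, hne]
    · have hc' : (pvW w).contains x = false := by simpa using hc
      unfold pvStep
      rw [PySem.Dict.items_insert_of_not_contains _ _ (hkeys.trans hc'),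
          PySem.Dict.items_insert_of_not_contains _ _ hc',
          PySem.Dict.getD_of_not_contains _ _ (hkeys.trans hc'),
          PySem.Dict.getD_of_not_contains _ _ hc', ih, List.map_append]
      rfl

-- solve s = (counts of the relative walk, its endpoint)
theorem combine (wl wr : List (Int × Int)) (hwr : wr ≠ []) :
    ((pvW wr).items.foldl
        (fun d kv => d.insert ((wl.getLastD (0, 0)).1 + kv.1.1, (wl.getLastD (0, 0)).2 + kv.1.2)
          (d.getD ((wl.getLastD (0, 0)).1 + kv.1.1, (wl.getLastD (0, 0)).2 + kv.1.2) 0 + kv.2))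
        (pvW wl),
      ((wl.getLastD (0, 0)).1 + (wr.getLastD (0, 0)).1,
       (wl.getLastD (0, 0)).2 + (wr.getLastD (0, 0)).2))
    = (pvW (wl ++ wr.map (fun p => ((wl.getLastD (0, 0)).1 + p.1, (wl.getLastD (0, 0)).2 + p.2))),
       (wl ++ wr.map (fun p => ((wl.getLastD (0, 0)).1 + p.1, (wl.getLastD (0, 0)).2 + p.2))).getLastD (0, 0)) := by
  simp only [Prod.mk.injEq]
  refine ⟨?_, ?_⟩
  · have hfold : (pvW wr).items.foldl
        (fun d kv => d.insert ((wl.getLastD (0, 0)).1 + kv.1.1, (wl.getLastD (0, 0)).2 + kv.1.2)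
          (d.getD ((wl.getLastD (0, 0)).1 + kv.1.1, (wl.getLastD (0, 0)).2 + kv.1.2) 0 + kv.2))
        (pvW wl)
        = ((pvW wr).items.map
            (fun p => (((wl.getLastD (0, 0)).1 + p.1.1, (wl.getLastD (0, 0)).2 + p.1.2), p.2))).foldl
            pvMStep (pvW wl) := by
      rw [List.foldl_map]
      rfl
    rw [hfold, ← shift_items wr (wl.getLastD (0, 0)), core]
    unfold pvW
    rw [List.foldl_append]
  · rcases List.eq_nil_or_concat wr with h | ⟨L, b, hw⟩
    · exact absurd h hwr
    · subst hw
      simp [List.concat_eq_append, List.map_append, ← List.append_assoc]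

theorem solve_spec (s : List Char) :
    solveB s = (pvW (pvWalk (0, 0) s), (pvWalk (0, 0) s).getLastD (0, 0)) := by
  induction s using solveB.induct with
  | case1 => rw [solveB]; rfl
  | case2 c =>
    rw [solveB]
    simp [pvWalk, pvW, pvStep, delta_eq, PySem.Dict.getD_empty]
  | case3 c1 c2 rest mid ih1 ih2 =>
    rw [show mid = (c1 :: c2 :: rest).length / 2 from rfl] at ih1 ih2
    have hdr_ne : List.drop ((c1 :: c2 :: rest).length / 2) (c1 :: c2 :: rest) ≠ [] := by
      intro h
      have hlen := congrArg List.length h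
      rw [List.length_drop] at hlen
      simp at hlen
      omega
    have hwr_ne : pvWalk (0, 0) (List.drop ((c1 :: c2 :: rest).length / 2) (c1 :: c2 :: rest)) ≠ [] := by
      intro h
      have hlen := walk_length (List.drop ((c1 :: c2 :: rest).length / 2) (c1 :: c2 :: rest)) (0, 0)
      rw [h] at hlen
      exact hdr_ne (List.eq_nil_of_length_eq_zero hlen.symm)
    have hwalk : pvWalk (0, 0) (c1 :: c2 :: rest)
        = pvWalk (0, 0) (List.take ((c1 :: c2 :: rest).length / 2) (c1 :: c2 :: rest))
          ++ (pvWalk (0, 0) (List.drop ((c1 :: c2 :: rest).length / 2) (c1 :: c2 :: rest))).map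
              (fun p =>
                (((pvWalk (0, 0) (List.take ((c1 :: c2 :: rest).length / 2) (c1 :: c2 :: rest))).getLastD (0, 0)).1 + p.1,
                 ((pvWalk (0, 0) (List.take ((c1 :: c2 :: rest).length / 2) (c1 :: c2 :: rest))).getLastD (0, 0)).2 + p.2)) := by
      conv_lhs => rw [← List.take_append_drop ((c1 :: c2 :: rest).length / 2) (c1 :: c2 :: rest)]
      rw [walk_append _ _ (0, 0),
        walk_shift0 (List.drop ((c1 :: c2 :: rest).length / 2) (c1 :: c2 :: rest))
          ((pvWalk (0, 0) (List.take ((c1 :: c2 :: rest).length / 2) (c1 :: c2 :: rest))).getLastD (0, 0))]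
    rw [solveB]
    simp only [ih1, ih2]
    rw [hwalk]
    exact combine _ _ hwr_ne

theorem mstep_eta :
    (fun (d : PySem.Dict (Int × Int) Int) kv => d.insert kv.1 (d.getD kv.1 0 + kv.2)) = pvMStep := rfl

-- ===== VERDICT (by name: the statement is the Claim_ definition above) =====
theorem track_visits_spec : Claim_equal_track_visits := by
  intro instructions _
  show track_visits instructions = track_visits_alt instructions
  unfold track_visits track_visits_alt
  simp only [mstep_eta, foldA, solve_spec, core]
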